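-- pv_equiv track=rewrite | github.com/1andrevich/Re-filter-lists | src/step3-content-check.py | prioritize_domains
-- ===== SOURCE A (Python) =====
-- from typing import Dict, Tuple, Optional, List, Set, Iterable
--
-- PRIORITY_TLDS: Tuple[str, ...] = ("com", "media", "io")
--
-- def prioritize_domains(domains: List[str]) -> List[str]:
--
--     buckets = {tld: [] for tld in PRIORITY_TLDS}
--
--     rest: List[str] = []
--
--     for dom in domains:
--
--         parts = dom.rsplit('.', 1)
--
--         tld = parts[1] if len(parts) == 2 else ''
--
--
--         if tld in buckets:
--
--
--
--             buckets[tld].append(dom)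
--
--
--
--         else:
--
--
--
--             rest.append(dom)
--
--
--
--     ordered: List[str] = []
--
--
--
--     for tld in PRIORITY_TLDS:
--
--
--
--         ordered.extend(buckets[tld])
--
--
--
--     ordered.extend(rest)
--
--
--
--     return ordered
-- ===== SOURCE B (Python) =====
-- from typing import List, Tuple
--
-- PRIORITY_TLDS: Tuple[str, ...] = ("com", "media", "io")
--
-- def prioritize_domains(domains: List[str]) -> List[str]:
--     def tld(d: str) -> str:
--         parts = d.rsplit('.', 1)
--         return parts[1] if len(parts) == 2 else ''
--     prio = [d for t in PRIORITY_TLDS for d in domains if tld(d) == t]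
--     rest = [d for d in domains if tld(d) not in PRIORITY_TLDS]
--     return prio + rest
-- ===== Notes on version B (the rewrite author's own statement) =====
-- stated objective: simpler
-- what changed: Replaces the single-pass dict-of-buckets accumulation and final concatenation with one filtering comprehension per priority TLD plus a final pass for the remainder, concatenated directly.
import Mathlib
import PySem

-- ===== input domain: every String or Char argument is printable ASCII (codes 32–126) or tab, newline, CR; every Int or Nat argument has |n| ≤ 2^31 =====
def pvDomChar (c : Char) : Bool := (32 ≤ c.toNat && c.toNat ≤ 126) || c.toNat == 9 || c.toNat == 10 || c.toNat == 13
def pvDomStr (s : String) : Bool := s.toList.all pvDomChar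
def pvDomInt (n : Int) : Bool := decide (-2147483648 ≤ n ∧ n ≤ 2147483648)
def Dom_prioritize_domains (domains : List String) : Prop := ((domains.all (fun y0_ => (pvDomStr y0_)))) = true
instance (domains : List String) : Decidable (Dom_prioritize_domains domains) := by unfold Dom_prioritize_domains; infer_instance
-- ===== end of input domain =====

-- B replaces A's single-pass dict-of-buckets accumulation with one filtering pass per
-- priority TLD plus a final pass for the rest (objective: simpler; same return value).

-- PRIORITY_TLDS = ("com", "media", "io")
def PRIORITY_TLDS : List String := ["com", "media", "io"]

-- dom.rsplit('.', 1), ported by hand (PySem has no rsplit): split at the LAST '.';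
-- exact for every string: no '.' -> [dom], else [before-last-dot, after-last-dot].
def pyRsplit1 (s : String) : List String :=
  let rev := s.toList.reverse
  let tl := rev.takeWhile (fun c => c ≠ '.')
  if tl.length = rev.length then [s]
  else [String.ofList ((rev.drop (tl.length + 1)).reverse), String.ofList tl.reverse]

-- parts = dom.rsplit('.', 1); tld = parts[1] if len(parts) == 2 else ''
def pyTld (dom : String) : String :=
  match pyRsplit1 dom with
  | [_, t] => t
  | _ => ""

-- ===== PORT A =====
-- body of A's first loop: tld in buckets -> buckets[tld].append(dom); else rest.append(dom)
def aStep (st : PySem.Dict String (List String) × List String) (dom : String)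
    : PySem.Dict String (List String) × List String :=
  let tld := pyTld dom
  if st.1.contains tld then (st.1.modify tld [] (fun l => l ++ [dom]), st.2)
  else (st.1, st.2 ++ [dom])

def prioritize_domains (domains : List String) : List String :=
  -- buckets = {tld: [] for tld in PRIORITY_TLDS}
  let buckets : PySem.Dict String (List String) :=
    PRIORITY_TLDS.foldl (fun d t => d.insert t []) PySem.Dict.empty
  let st := domains.foldl aStep (buckets, [])
  -- ordered: extend per priority tld, then extend with rest
  let ordered := PRIORITY_TLDS.foldl (fun acc t => acc ++ st.1.getD t []) []
  ordered ++ st.2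

-- ===== PORT B =====
def prioritize_domains_alt (domains : List String) : List String :=
  let prio := PRIORITY_TLDS.flatMap (fun t => domains.filter (fun d => pyTld d == t))
  let rest := domains.filter (fun d => !(PRIORITY_TLDS.contains (pyTld d)))
  prio ++ rest

-- ===== PRECONDITION & SPEC =====
def Spec_prioritize_domains (domains : List String) (out : List String) : Prop := out = prioritize_domains_alt domains
instance (domains : List String) (out : List String) : Decidable (Spec_prioritize_domains domains out) := by unfold Spec_prioritize_domains; infer_instance

-- ===== CLAIM (what is proved, stated in full; the proofs are below) =====
def Claim_equal_prioritize_domains : Prop := ∀ (domains : List String), Dom_prioritize_domains domains → Spec_prioritize_domains domains (prioritize_domains domains)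

-- ===== LEMMAS AND PROOFS =====

-- the concrete bucket dict A's loop maintains: {"com": b0, "media": b1, "io": b2}
def mkD (b0 b1 b2 : List String) : PySem.Dict String (List String) :=
  ((PySem.Dict.empty.insert "com" b0).insert "media" b1).insert "io" b2

-- invariant of A's first loop: each bucket accumulates the filter by its TLD, rest the remainder
theorem loop_inv (ds : List String) (b0 b1 b2 rest : List String) :
    ds.foldl aStep (mkD b0 b1 b2, rest)
      = (mkD (b0 ++ ds.filter (fun d => pyTld d == "com"))
             (b1 ++ ds.filter (fun d => pyTld d == "media"))
             (b2 ++ ds.filter (fun d => pyTld d == "io")),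
         rest ++ ds.filter (fun d => !(PRIORITY_TLDS.contains (pyTld d)))) := by
  induction ds generalizing b0 b1 b2 rest with
  | nil => simp
  | cons d ds ih =>
    by_cases h0 : pyTld d = "com"
    · have hs : aStep (mkD b0 b1 b2, rest) d = (mkD (b0 ++ [d]) b1 b2, rest) := by
        simp only [aStep, h0]; rfl
      simp only [List.foldl_cons, hs, ih, List.filter_cons, h0, PRIORITY_TLDS]
      simp [List.append_assoc]
    · by_cases h1 : pyTld d = "media"
      · have hs : aStep (mkD b0 b1 b2, rest) d = (mkD b0 (b1 ++ [d]) b2, rest) := by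
          simp only [aStep, h1]; rfl
        simp only [List.foldl_cons, hs, ih]
        simp [h1, List.append_assoc, PRIORITY_TLDS]
      · by_cases h2 : pyTld d = "io"
        · have hs : aStep (mkD b0 b1 b2, rest) d = (mkD b0 b1 (b2 ++ [d]), rest) := by
            simp only [aStep, h2]; rfl
          simp only [List.foldl_cons, hs, ih]
          simp [h2, List.append_assoc, PRIORITY_TLDS]
        · have hc : (mkD b0 b1 b2).contains (pyTld d) = false := by
            simp [mkD, PySem.Dict.contains, PySem.Dict.insert, PySem.Dict.empty]
            exact ⟨fun h => h0 h.symm, fun h => h1 h.symm, fun h => h2 h.symm⟩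
          have hs : aStep (mkD b0 b1 b2, rest) d = (mkD b0 b1 b2, rest ++ [d]) := by
            simp [aStep, hc]
          simp only [List.foldl_cons, hs, ih]
          simp [h0, h1, h2, List.append_assoc, PRIORITY_TLDS]

-- ===== VERDICT (by name: the statement is the Claim_ definition above) =====
theorem prioritize_domains_spec : Claim_equal_prioritize_domains := by
  intro domains _
  show prioritize_domains domains = prioritize_domains_alt domains
  unfold prioritize_domains prioritize_domains_alt
  show (List.foldl (fun acc t => acc ++ (List.foldl aStep (mkD [] [] [], []) domains).1.getD t [])
          [] PRIORITY_TLDS) ++ (List.foldl aStep (mkD [] [] [], []) domains).2 = _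
  rw [loop_inv domains [] [] [] []]
  simp [mkD, PRIORITY_TLDS, PySem.Dict.getD, PySem.Dict.get?, PySem.Dict.insert, PySem.Dict.empty,
        List.flatMap]
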